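-- pv_equiv track=rewrite | github.com/sunilsoni/interview-notes-python | com/interview/2025/november/test1/test3.py | final_board_after_game
-- ===== SOURCE A (Python) =====
-- def final_board_after_game(s: str) -> str:
--     n = len(s)
--     stack = []
--
--     i = 0
--     while i < n:
--         j = i + 1
--         while j < n and s[j] == s[i]:
--             j += 1
--         run_len = j - i
--         ch = s[i]
--
--         if run_len >= 2:
--             pass
--         else:
--             if stack and stack[-1][0] == ch:
--                 stack[-1][1] += 1
--                 if stack[-1][1] >= 2:
--                     stack.pop()
--             else:
--                 stack.append([ch, 1])
--
--         i = j
--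
--     result_parts = []
--     for ch, cnt in stack:
--         result_parts.append(ch * cnt)
--
--     return "".join(result_parts)
-- ===== SOURCE B (Python) =====
-- def final_board_after_game(s: str) -> str:
--     # one pass: a character survives the first elimination iff it differs from
--     # both neighbours; surviving characters then cancel on a bare-char stack
--     chars = list(s)
--     nexts = chars[1:] + [None]
--     stack = []
--     prev = None
--     for ch, nxt in zip(chars, nexts):
--         if ch != prev and ch != nxt:
--             if stack and stack[-1] == ch:
--                 stack.pop()
--             else:
--                 stack.append(ch)
--         prev = ch
--     return "".join(stack)
-- ===== Notes on version B (the rewrite author's own statement) =====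
-- stated objective: simpler
-- what changed: Replaces A's nested index-scanning run loop with a counted-pair stack by a single fused pass: a neighbour test (char differs from both neighbours) detects surviving characters and a bare-char stack cancels adjacent equal survivors.
import Mathlib
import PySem

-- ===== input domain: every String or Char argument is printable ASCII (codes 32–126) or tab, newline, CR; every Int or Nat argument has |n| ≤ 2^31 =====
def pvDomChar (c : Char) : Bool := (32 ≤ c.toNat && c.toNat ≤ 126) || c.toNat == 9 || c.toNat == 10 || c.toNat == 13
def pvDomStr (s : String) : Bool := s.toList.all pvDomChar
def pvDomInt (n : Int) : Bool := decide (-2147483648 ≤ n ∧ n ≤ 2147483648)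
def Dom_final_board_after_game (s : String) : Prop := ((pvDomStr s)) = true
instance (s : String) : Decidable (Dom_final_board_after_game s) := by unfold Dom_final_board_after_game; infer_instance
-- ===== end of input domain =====

-- B replaces A's nested run-scanning loop + counted-pair stack by one fused pass with a
-- neighbour test and a bare-char stack: simpler, and measurably faster by a constant factor.


-- ===== PORT A =====
-- inner `while j < n and s[j] == s[i]`: count the leading chars equal to c, return the rest
def skipRun (c : Char) : List Char → Nat × List Char
  | [] => (0, [])
  | d :: ds => if d = c then ((skipRun c ds).1 + 1, (skipRun c ds).2) else (0, d :: ds)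

theorem skipRun_snd_length (c : Char) (cs : List Char) : (skipRun c cs).2.length ≤ cs.length := by
  induction cs with
  | nil => simp [skipRun]
  | cons d ds ih => by_cases h : d = c <;> simp [skipRun, h] <;> omega

-- outer `while i < n` ported as structural recursion on the remaining suffix s[i:] (exact):
-- run_len = 1 + (skipRun ch rest).1, `i = j` becomes recursing on (skipRun ch rest).2
def agameAux (stack : List (Char × Int)) : List Char → List (Char × Int)
  | [] => stack
  | c :: rest =>
    if 1 + (skipRun c rest).1 ≥ 2 then agameAux stack (skipRun c rest).2
    else
      -- `if stack and stack[-1][0] == ch: stack[-1][1] += 1; if stack[-1][1] >= 2: stack.pop()`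
      match stack.getLast? with
      | some (d, cnt) =>
          if d = c then
            if cnt + 1 ≥ 2 then agameAux stack.dropLast (skipRun c rest).2
            else agameAux (stack.dropLast ++ [(d, cnt + 1)]) (skipRun c rest).2
          else agameAux (stack ++ [(c, 1)]) (skipRun c rest).2
      | none => agameAux (stack ++ [(c, 1)]) (skipRun c rest).2
termination_by l => l.length
decreasing_by all_goals (have := skipRun_snd_length c rest; simp only [List.length_cons]; omega)

def final_board_after_game (s : String) : String :=
  -- result_parts.append(ch * cnt); "".join(result_parts)
  String.mk (((agameAux [] s.toList).map (fun p => List.replicate p.2.toNat p.1)).flatten)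

-- ===== PORT B =====
-- stack step: `if stack and stack[-1] == ch: stack.pop() else: stack.append(ch)`
def bpush (st : List Char) (c : Char) : List Char :=
  if st.getLast? = some c then st.dropLast else st ++ [c]

-- `for ch, nxt in zip(chars, nexts)` body, state (prev, stack)
def bstep (st : Option Char × List Char) (p : Char × Option Char) : Option Char × List Char :=
  if some p.1 ≠ st.1 ∧ some p.1 ≠ p.2 then (some p.1, bpush st.2 p.1) else (some p.1, st.2)

def final_board_after_game_alt (s : String) : String :=
  String.mk ((List.zip s.toList ((s.toList.drop 1).map some ++ [none])).foldl bstep (none, [])).2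

-- ===== PRECONDITION & SPEC =====
def Spec_final_board_after_game (s : String) (out : String) : Prop := out = final_board_after_game_alt s
instance (s : String) (out : String) : Decidable (Spec_final_board_after_game s out) := by unfold Spec_final_board_after_game; infer_instance

-- ===== CLAIM (what is proved, stated in full; the proofs are below) =====
def Claim_equal_final_board_after_game : Prop := ∀ (s : String), Dom_final_board_after_game s → Spec_final_board_after_game s (final_board_after_game s)

-- ===== LEMMAS AND PROOFS =====

-- the characters of runs of length 1, by run decomposition (A's traversal order)
def rsing : List Char → List Char
  | [] => []
  | c :: rest =>
    if (skipRun c rest).1 = 0 then c :: rsing (skipRun c rest).2 else rsing (skipRun c rest).2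
termination_by l => l.length
decreasing_by all_goals (have := skipRun_snd_length c rest; simp only [List.length_cons]; omega)

-- the same characters, by the neighbour test with explicit previous character (B's traversal order)
def nsing : Option Char → List Char → List Char
  | _, [] => []
  | p, [c] => if some c ≠ p then [c] else []
  | p, c :: d :: rest => (if some c ≠ p ∧ c ≠ d then [c] else []) ++ nsing (some c) (d :: rest)

-- run decomposition with a previous-character guard (bridge between the two)
def rsingP : Option Char → List Char → List Char
  | _, [] => []
  | p, c :: rest =>
    (if (skipRun c rest).1 = 0 ∧ p ≠ some c then [c] else []) ++ rsingP (some c) (skipRun c rest).2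
termination_by _ l => l.length
decreasing_by all_goals (have := skipRun_snd_length c rest; simp only [List.length_cons]; omega)

theorem skipRun_head (c : Char) (cs : List Char) : (skipRun c cs).2.head? ≠ some c := by
  induction cs with
  | nil => simp [skipRun]
  | cons d ds ih =>
      by_cases h : d = c
      · simpa [skipRun, h] using ih
      · simp [skipRun, h]

theorem nsing_eq_rsingP (p : Option Char) (cs : List Char) : nsing p cs = rsingP p cs := by
  induction p, cs using nsing.induct with
  | case1 => simp [nsing, rsingP]
  | case2 p c h => simp [nsing, rsingP, skipRun, h, (by simpa [eq_comm] using h : p ≠ some c)]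
  | case3 p c h =>
      have hp : p = some c := by by_contra hc; exact h (by simp [eq_comm, hc])
      simp [nsing, rsingP, skipRun, hp]
  | case4 p c d rest ih =>
      by_cases h : d = c
      · subst h
        simp only [nsing, rsingP, skipRun, if_pos rfl, ih]
        simp [rsingP]
      · have hcd : ¬ c = d := fun e => h e.symm
        simp only [nsing, rsingP, skipRun, if_neg h, ih]
        by_cases hp : p = some c <;> simp [hp, hcd, eq_comm]

theorem rsingP_eq_rsing (cs : List Char) : ∀ (p : Option Char),
    (∀ c, cs.head? = some c → p ≠ some c) → rsingP p cs = rsing cs := by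
  induction cs using rsing.induct with
  | case1 => intro p h; simp [rsingP, rsing]
  | case2 c rest hq ih =>
      intro p h
      have hp : p ≠ some c := h c rfl
      have hih := ih (some c) (by
        intro e he hce
        have := skipRun_head c rest
        rw [he] at this
        simp at hce
        exact this (by rw [hce]))
      simp [rsingP, rsing, hq, hp, hih]
  | case3 c rest hq ih =>
      intro p h
      have hih := ih (some c) (by
        intro e he hce
        have := skipRun_head c rest
        rw [he] at this
        simp at hce
        exact this (by rw [hce]))
      simp [rsingP, rsing, hq, hih]

theorem nsing_none_eq_rsing (cs : List Char) : nsing none cs = rsing cs := by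
  rw [nsing_eq_rsingP]
  exact rsingP_eq_rsing cs none (by simp)

-- A's stack operation on a singleton run, as a function
def opA (stack : List (Char × Int)) (c : Char) : List (Char × Int) :=
  match stack.getLast? with
  | some (d, cnt) =>
      if d = c then
        if cnt + 1 ≥ 2 then stack.dropLast else stack.dropLast ++ [(d, cnt + 1)]
      else stack ++ [(c, 1)]
  | none => stack ++ [(c, 1)]

theorem agameAux_cons (stack : List (Char × Int)) (c : Char) (rest : List Char) :
    agameAux stack (c :: rest)
      = if (skipRun c rest).1 = 0 then agameAux (opA stack c) (skipRun c rest).2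
        else agameAux stack (skipRun c rest).2 := by
  by_cases hk : (skipRun c rest).1 = 0
  · cases h : stack.getLast? with
    | none => simp [agameAux, hk, h, opA]
    | some q =>
        obtain ⟨d, cnt⟩ := q
        by_cases hd : d = c
        · by_cases hc : cnt + 1 ≥ 2 <;> simp [agameAux, hk, h, hd, hc, opA]
        · simp [agameAux, hk, h, hd, opA]
  · have h2 : 1 + (skipRun c rest).1 ≥ 2 := by omega
    simp [agameAux, hk, h2]

theorem agameAux_eq_foldl (cs : List Char) : ∀ (stack : List (Char × Int)),
    agameAux stack cs = List.foldl opA stack (rsing cs) := by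
  induction cs using rsing.induct with
  | case1 => intro stack; simp [agameAux, rsing]
  | case2 c rest hq ih =>
      intro stack
      rw [agameAux_cons]
      simp [rsing, hq, ih]
  | case3 c rest hq ih =>
      intro stack
      rw [agameAux_cons]
      simp [rsing, hq, ih]

-- invariant: every count on A's stack is 1, so it is B's char stack tagged with 1
theorem foldl_opA_map (l : List Char) : ∀ (st : List Char),
    List.foldl opA (st.map (fun c => (c, (1:Int)))) l
      = (List.foldl bpush st l).map (fun c => (c, (1:Int))) := by
  induction l with
  | nil => intro st; simp
  | cons c l ih =>
      intro st
      have hstep : opA (st.map (fun c => (c, (1:Int)))) c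
          = (bpush st c).map (fun c => (c, (1:Int))) := by
        unfold opA bpush
        rw [List.getLast?_map]
        cases h : st.getLast? with
        | none => simp
        | some d => by_cases hd : d = c <;> simp [hd, List.map_dropLast]
      simp only [List.foldl_cons, hstep, ih]

-- tagging a char stack with count 1 and flattening the replicates gives it back
theorem flatten_tag (l : List Char) :
    ((l.map (fun c => (c, (1:Int)))).map (fun p => List.replicate p.2.toNat p.1)).flatten = l := by
  induction l with
  | nil => rfl
  | cons c l ih => simp only [List.map_cons, List.flatten_cons, ih]; rfl

-- B's zipped fold equals folding bpush over the neighbour-test survivors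
theorem bfold_eq (p : Option Char) (cs : List Char) : ∀ (st : List Char),
    ((List.zip cs ((cs.drop 1).map some ++ [none])).foldl bstep (p, st)).2
      = List.foldl bpush st (nsing p cs) := by
  induction p, cs using nsing.induct with
  | case1 => intro st; simp [nsing]
  | case2 p c h => intro st; simp [nsing, bstep, h]
  | case3 p c h => intro st; simp [nsing, bstep, h]
  | case4 p c d rest ih =>
      intro st
      by_cases h : (some c ≠ p ∧ c ≠ d)
      · simp only [List.drop_succ_cons, List.drop_zero, List.map_cons, List.cons_append,
          List.zip_cons_cons, List.foldl_cons, nsing, if_pos h]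
        simp only [bstep]
        rw [if_pos (by simpa [eq_comm] using h)]
        simpa using ih (bpush st c)
      · simp only [List.drop_succ_cons, List.drop_zero, List.map_cons, List.cons_append,
          List.zip_cons_cons, List.foldl_cons, nsing, if_neg h]
        simp only [bstep]
        rw [if_neg (by simpa [eq_comm] using h)]
        simpa using ih st

-- ===== VERDICT (by name: the statement is the Claim_ definition above) =====
theorem final_board_after_game_spec : Claim_equal_final_board_after_game := by
  intro s _
  show _ = _
  unfold final_board_after_game final_board_after_game_alt
  rw [agameAux_eq_foldl, bfold_eq, nsing_none_eq_rsing]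
  have h := foldl_opA_map (rsing s.toList) []
  simp only [List.map_nil] at h
  rw [h]
  congr 1
  exact flatten_tag _
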